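-- pv_equiv track=rewrite | github.com/khk1262/PS | Code/boj_10868(Segment-tree).py | update_min_node
-- ===== SOURCE A (Python) =====
-- def update_min_node(tree, arr, index, num, node, start, end):
--     if index < start or index > end:
--         return tree[node]
--     if start == end:
--         tree[node] = num
--         return tree[node]
--
--     tree[node] = min(update_min_node(tree, arr, index, num, 2 * node, start, (start + end) // 2),
--                      update_min_node(tree, arr, index, num, 2 * node + 1, (start + end) // 2 + 1, end))
--     return tree[node]
-- ===== SOURCE B (Python) =====
-- def update_min_node(tree, arr, index, num, node, start, end):
--     if index < start or index > end:
--         return tree[node]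
--     # descend only into the child containing index, recording each
--     # parent together with the other child's stored value
--     sibs = []
--     while start < end:
--         mid = (start + end) // 2
--         if index <= mid:
--             sibs.append((node, tree[2 * node + 1]))
--             node, end = 2 * node, mid
--         else:
--             sibs.append((node, tree[2 * node]))
--             node, start = 2 * node + 1, mid + 1
--     tree[node] = num
--     val = num
--     for parent, s in reversed(sibs):
--         val = min(val, s)
--         tree[parent] = val
--     return val
-- ===== Notes on version B (the rewrite author's own statement) =====
-- stated objective: alternative
-- what changed: A recursively re-walks BOTH children of every node on the update path; B iteratively descends only into the child containing the index, recording each sibling's stored value, then writes the leaf and folds min upward over the recorded siblings.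
-- outside the precondition, e.g. on update_min_node([5, -3, 7, 8], [], 1, 9, 0, 0, 3): A returns 5, B returns -3; on update_min_node([9, 8, 7, 6, 5, 4], [], 0, 1, 1, 0, 2): A returns 1, B returns 1
import Mathlib
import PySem

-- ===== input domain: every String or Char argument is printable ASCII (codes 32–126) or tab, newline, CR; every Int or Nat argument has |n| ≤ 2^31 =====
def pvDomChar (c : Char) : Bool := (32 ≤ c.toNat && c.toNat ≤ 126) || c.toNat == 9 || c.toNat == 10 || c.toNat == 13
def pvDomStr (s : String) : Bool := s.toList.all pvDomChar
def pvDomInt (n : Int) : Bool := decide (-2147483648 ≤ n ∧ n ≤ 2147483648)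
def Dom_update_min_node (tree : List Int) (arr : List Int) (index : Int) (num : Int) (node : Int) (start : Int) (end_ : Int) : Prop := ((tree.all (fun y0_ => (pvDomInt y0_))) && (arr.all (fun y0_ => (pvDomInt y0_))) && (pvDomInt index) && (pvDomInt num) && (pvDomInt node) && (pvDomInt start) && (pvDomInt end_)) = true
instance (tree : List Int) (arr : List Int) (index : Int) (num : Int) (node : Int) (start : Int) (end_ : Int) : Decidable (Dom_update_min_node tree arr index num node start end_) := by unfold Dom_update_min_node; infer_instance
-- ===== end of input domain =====

-- B replaces A's recursion into BOTH children of every node by a single iterative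
-- root-to-leaf descent into the child containing `index`, combining with each sibling's
-- stored value on the way back up.  Both A and B mutate `tree` in place; the claim proved
-- here is about the RETURN value only.
-- (Both ports carry a structural fuel argument, (end_ - start).toNat + 1, strictly larger
-- than the halving recursion depth, so it is never exhausted: a totality guard only.)

-- ===== PORT A =====
-- goA threads the mutated list through A's recursion: returns (final tree, returned value)
def goA : Nat → List Int → Int → Int → Int → Int → Int → List Int × Int
  | 0, tree, _, _, _, _, _ => (tree, 0)  -- out of fuel: never reached from update_min_node
  | fuel + 1, tree, index, num, node, start, end_ =>
    if index < start ∨ index > end_ then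
      (tree, PySem.List.pyGetD tree node 0)
    else if start = end_ then
      let t := PySem.List.pySetD tree node num
      (t, PySem.List.pyGetD t node 0)
    else
      let l := goA fuel tree index num (2 * node) start (PySem.Int.floordiv (start + end_) 2)
      let r := goA fuel l.1 index num (2 * node + 1) (PySem.Int.floordiv (start + end_) 2 + 1) end_
      let t := PySem.List.pySetD r.1 node (min l.2 r.2)
      (t, PySem.List.pyGetD t node 0)

def update_min_node (tree : List Int) (arr : List Int) (index : Int) (num : Int) (node : Int) (start : Int) (end_ : Int) : Int :=
  (goA ((end_ - start).toNat + 1) tree index num node start end_).2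

-- ===== PORT B =====
-- descendB is Source B's while-loop: walk into the child containing `index`,
-- collecting (parent, other child's stored value); returns (sibs, leaf node)
def descendB : Nat → List Int → Int → Int → Int → Int → List (Int × Int) × Int
  | 0, _, _, node, _, _ => ([], node)  -- out of fuel: never reached from update_min_node_alt
  | fuel + 1, tree, index, node, start, end_ =>
    if start < end_ then
      if index ≤ PySem.Int.floordiv (start + end_) 2 then
        let rest := descendB fuel tree index (2 * node) start (PySem.Int.floordiv (start + end_) 2)
        ((node, PySem.List.pyGetD tree (2 * node + 1) 0) :: rest.1, rest.2)
      else
        let rest := descendB fuel tree index (2 * node + 1) (PySem.Int.floordiv (start + end_) 2 + 1) end_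
        ((node, PySem.List.pyGetD tree (2 * node) 0) :: rest.1, rest.2)
    else ([], node)

def update_min_node_alt (tree : List Int) (arr : List Int) (index : Int) (num : Int) (node : Int) (start : Int) (end_ : Int) : Int :=
  if index < start ∨ index > end_ then
    PySem.List.pyGetD tree node 0
  else
    let d := descendB ((end_ - start).toNat + 1) tree index node start end_
    -- tree[leaf] = num, then the upward min-combination loop over reversed sibs
    let fin := d.1.reverse.foldl
      (fun (st : List Int × Int) p => (PySem.List.pySetD st.1 p.1 (min st.2 p.2), min st.2 p.2))
      (PySem.List.pySetD tree d.2 num, num)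
    fin.2

-- ===== PRECONDITION & SPEC =====
-- Pre_ excludes (a) recursive calls (start ≤ index ≤ end_, start < end_) whose root is not a
-- positive node index with a tree long enough for the whole descent: with node ≤ 0 the
-- heap-index aliasing (2·0 = 0, negative wraparound) makes A's sibling reads observe its own
-- earlier writes — an accident of A's mutation order — and with a short tree A raises
-- IndexError (the 2^clog bound is slightly conservative: on a few short-tree inputs A happens
-- to return, and agrees with B, because its path misses the largest heap index); and
-- (b) non-recursive calls whose `node` is out of range for `tree`, where A raises IndexError.
def Pre_update_min_node (tree : List Int) (arr : List Int) (index : Int) (num : Int) (node : Int) (start : Int) (end_ : Int) : Prop :=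
  (start ≤ index ∧ index ≤ end_ ∧ start < end_ →
      1 ≤ node ∧ (node.toNat + 1) * 2 ^ Nat.clog 2 ((end_ - start + 1).toNat) ≤ tree.length) ∧
  (¬(start ≤ index ∧ index ≤ end_ ∧ start < end_) → PySem.Raise.InRange tree.length node)
instance (tree : List Int) (arr : List Int) (index : Int) (num : Int) (node : Int) (start : Int) (end_ : Int) : Decidable (Pre_update_min_node tree arr index num node start end_) := by unfold Pre_update_min_node; infer_instance

def pvWitness_update_min_node : List Int × List Int × Int × Int × Int × Int × Int :=
  ([0, 5, 3, 2, 7], [], 1, 4, 1, 0, 1)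

def Spec_update_min_node (tree : List Int) (arr : List Int) (index : Int) (num : Int) (node : Int) (start : Int) (end_ : Int) (out : Int) : Prop := out = update_min_node_alt tree arr index num node start end_
instance (tree : List Int) (arr : List Int) (index : Int) (num : Int) (node : Int) (start : Int) (end_ : Int) (out : Int) : Decidable (Spec_update_min_node tree arr index num node start end_ out) := by unfold Spec_update_min_node; infer_instance

-- ===== CLAIM (what is proved, stated in full; the proofs are below) =====
def Claim_equal_update_min_node : Prop := ∀ (tree : List Int) (arr : List Int) (index : Int) (num : Int) (node : Int) (start : Int) (end_ : Int), Dom_update_min_node tree arr index num node start end_ → Pre_update_min_node tree arr index num node start end_ → Spec_update_min_node tree arr index num node start end_ (update_min_node tree arr index num node start end_)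

-- ===== LEMMAS AND PROOFS =====

theorem pvMeasLeft {start end_ : Int} (h : start < end_) :
    (PySem.Int.floordiv (start + end_) 2 - start).toNat < (end_ - start).toNat := by
  have hm := PySem.Int.floordiv_two_mid_bounds (lo := start) (hi := end_) (by omega)
  have hlt : PySem.Int.floordiv (start + end_) 2 < end_ :=
    (PySem.Int.floordiv_lt_iff_lt_mul (by omega)).mpr (by omega)
  omega

theorem pvMeasRight {start end_ : Int} (h : start < end_) :
    (end_ - (PySem.Int.floordiv (start + end_) 2 + 1)).toNat < (end_ - start).toNat := by
  have hm := PySem.Int.floordiv_two_mid_bounds (lo := start) (hi := end_) (by omega)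
  omega

-- reading back the element just written, for any in-range (possibly negative) index
theorem getD_setD_self (xs : List Int) (i : Int) (v : Int) (h : PySem.Raise.InRange xs.length i) :
    PySem.List.pyGetD (PySem.List.pySetD xs i v) i 0 = v := by
  obtain ⟨hle, hlt⟩ := h
  by_cases h0 : 0 ≤ i
  · simp [PySem.List.pyGetD, PySem.List.pySetD, PySem.List.pySet?, PySem.List.pyGet?, PySem.List.pyIdx?, h0, hlt]
  · have hk : xs.length - (-i).toNat < xs.length := by omega
    simp [PySem.List.pyGetD, PySem.List.pySetD, PySem.List.pySet?, PySem.List.pyGet?, PySem.List.pyIdx?, h0, hle, hk]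

theorem goA_length (fuel : Nat) (tree : List Int) (index num node start end_ : Int) :
    (goA fuel tree index num node start end_).1.length = tree.length := by
  induction fuel generalizing tree node start end_ with
  | zero => rfl
  | succ fuel ih =>
    by_cases h1 : index < start ∨ index > end_
    · rw [goA, if_pos h1]
    · by_cases h2 : start = end_
      · rw [goA, if_neg h1, if_pos h2]
        exact PySem.List.length_pySetD _ _ _
      · rw [goA, if_neg h1, if_neg h2]
        exact (PySem.List.length_pySetD _ _ _).trans ((ih _ _ _ _).trans (ih _ _ _ _))

theorem div_pow_succ_eq (j m : ℕ) (k : ℕ) (h : j / 2 ^ k = 2 * m) : j / 2 ^ (k + 1) = m := by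
  rw [pow_succ, ← Nat.div_div_eq_div_mul, h]
  omega

-- A's recursion writes only inside the heap subtree of `node`: positions j with
-- j / 2^k = node.toNat for some k; everything else is untouched
theorem goA_get?_eq (fuel : Nat) (tree : List Int) (index num node start end_ : Int) (hn : 1 ≤ node)
    (j : ℕ) (hj : ∀ k : ℕ, j / 2 ^ k ≠ node.toNat) :
    ((goA fuel tree index num node start end_).1)[j]? = tree[j]? := by
  revert hn hj
  induction fuel generalizing tree node start end_ with
  | zero => intro _ _; rfl
  | succ fuel ih =>
    intro hn hj
    by_cases h1 : index < start ∨ index > end_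
    · rw [goA, if_pos h1]
    · by_cases h2 : start = end_
      · rw [goA, if_neg h1, if_pos h2]
        show (PySem.List.pySetD tree node num)[j]? = tree[j]?
        rw [PySem.List.pySetD_of_nonneg tree num (by omega),
          List.getElem?_set_ne (by intro h; exact hj 0 (by simpa using h.symm))]
      · rw [goA, if_neg h1, if_neg h2]
        have hd1 : ∀ k : ℕ, j / 2 ^ k ≠ (2 * node).toNat := by
          intro k hk
          exact hj (k + 1) (div_pow_succ_eq j node.toNat k (by omega))
        have hd2 : ∀ k : ℕ, j / 2 ^ k ≠ (2 * node + 1).toNat := by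
          intro k hk
          apply hj (k + 1)
          rw [pow_succ, ← Nat.div_div_eq_div_mul, hk]
          omega
        set m := PySem.Int.floordiv (start + end_) 2 with hmdef
        set l := goA fuel tree index num (2 * node) start m with hldef
        set r := goA fuel l.1 index num (2 * node + 1) (m + 1) end_ with hrdef
        have e1 : l.1[j]? = tree[j]? := ih _ _ _ _ (by omega) hd1
        have e2 : r.1[j]? = l.1[j]? := ih _ _ _ _ (by omega) hd2
        show (PySem.List.pySetD r.1 node (min l.2 r.2))[j]? = tree[j]?
        rw [PySem.List.pySetD_of_nonneg r.1 (min l.2 r.2) (by omega),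
          List.getElem?_set_ne (by intro h; exact hj 0 (by simpa using h.symm)), e2, e1]

-- a right sibling is not in the left child's subtree
theorem not_desc_right (n : ℕ) (hn : 1 ≤ n) (k : ℕ) : (2 * n + 1) / 2 ^ k ≠ 2 * n := by
  cases k with
  | zero => simp
  | succ k =>
    have h1 : (2 * n + 1) / 2 ^ (k + 1) ≤ (2 * n + 1) / 2 ^ 1 :=
      Nat.div_le_div_left (Nat.pow_le_pow_right (by omega) (by omega)) (by positivity)
    have h2 : (2 * n + 1) / 2 ^ 1 = n := by omega
    omega

theorem node_lt (node : Int) (L : ℕ) (d : ℕ) (hb : (node.toNat + 1) * 2 ^ d ≤ L) :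
    node.toNat < L := by
  have h := Nat.le_mul_of_pos_right (node.toNat + 1) (pow_pos (by omega : (0:ℕ) < 2) d)
  omega

-- the ceiling-log length bound is inherited by both children of a split segment
theorem bound_step (node start end_ : Int) (L : ℕ) (hn : 1 ≤ node) (hse : start < end_)
    (hb : (node.toNat + 1) * 2 ^ Nat.clog 2 ((end_ - start + 1).toNat) ≤ L) :
    ((2 * node).toNat + 1) * 2 ^ Nat.clog 2 ((PySem.Int.floordiv (start + end_) 2 - start + 1).toNat) ≤ L ∧
    ((2 * node + 1).toNat + 1) * 2 ^ Nat.clog 2 ((end_ - (PySem.Int.floordiv (start + end_) 2 + 1) + 1).toNat) ≤ L := by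
  have h1 := PySem.Int.floordiv_mul_add_mod (start + end_) 2
  have h2 := PySem.Int.mod_nonneg (start + end_) (b := 2) (by omega)
  have h3 := PySem.Int.mod_lt (start + end_) (b := 2) (by omega)
  set m := PySem.Int.floordiv (start + end_) 2 with hm
  set S := (end_ - start + 1).toNat with hS
  have hS2 : 2 ≤ S := by omega
  have hSL : (m - start + 1).toNat ≤ (S + 1) / 2 := by omega
  have hSR : (end_ - (m + 1) + 1).toNat ≤ (S + 1) / 2 := by omega
  have hd : Nat.clog 2 S = Nat.clog 2 ((S + 1) / 2) + 1 := by
    have h := Nat.clog_of_two_le (b := 2) (n := S) (by omega) hS2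
    have : (S + 2 - 1) / 2 = (S + 1) / 2 := by omega
    rw [this] at h
    exact h
  have hcl := Nat.clog_mono_right 2 hSL
  have hcr := Nat.clog_mono_right 2 hSR
  have key : ∀ c : ℕ, c ≤ 2 * node.toNat + 2 →
      ∀ s : ℕ, Nat.clog 2 s ≤ Nat.clog 2 ((S + 1) / 2) → c * 2 ^ Nat.clog 2 s ≤ L := by
    intro c hc s hs
    calc c * 2 ^ Nat.clog 2 s ≤ (2 * node.toNat + 2) * 2 ^ Nat.clog 2 ((S + 1) / 2) :=
          Nat.mul_le_mul hc (Nat.pow_le_pow_right (by omega) hs)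
      _ = (node.toNat + 1) * 2 ^ Nat.clog 2 S := by rw [hd, pow_succ]; ring
      _ ≤ L := hb
  exact ⟨key _ (by omega) _ hcl, key _ (by omega) _ hcr⟩

-- the pure value recursion both ports compute on Pre_ (proof-side only)
def valR (tree : List Int) (index num node start end_ : Int) : Int :=
  if index < start ∨ index > end_ then PySem.List.pyGetD tree node 0
  else if start = end_ then num
  else
    if index ≤ PySem.Int.floordiv (start + end_) 2 then
      min (valR tree index num (2 * node) start (PySem.Int.floordiv (start + end_) 2))
          (PySem.List.pyGetD tree (2 * node + 1) 0)
    else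
      min (PySem.List.pyGetD tree (2 * node) 0)
          (valR tree index num (2 * node + 1) (PySem.Int.floordiv (start + end_) 2 + 1) end_)
termination_by (end_ - start).toNat
decreasing_by
  · exact pvMeasLeft (by omega)
  · exact pvMeasRight (by omega)

theorem pyGetD_congr (xs ys : List Int) (i : Int) (h0 : 0 ≤ i)
    (hlen : ys.length = xs.length) (hj : ys[i.toNat]? = xs[i.toNat]?) :
    PySem.List.pyGetD ys i 0 = PySem.List.pyGetD xs i 0 := by
  simp [PySem.List.pyGetD, PySem.List.pyGet?, PySem.List.pyIdx?, h0, hlen]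
  split_ifs with h
  · simp [hj]
  · rfl

theorem goA_val (fuel : Nat) (tree : List Int) (index num node start end_ : Int)
    (hf : (end_ - start).toNat < fuel) (hn : 1 ≤ node)
    (hb : (node.toNat + 1) * 2 ^ Nat.clog 2 ((end_ - start + 1).toNat) ≤ tree.length) :
    (goA fuel tree index num node start end_).2 = valR tree index num node start end_ := by
  revert hf hn hb
  induction fuel generalizing tree node start end_ with
  | zero => intro hf _ _; omega
  | succ fuel ih =>
    intro hf hn hb
    by_cases h1 : index < start ∨ index > end_
    · rw [goA, if_pos h1, valR, if_pos h1]
    · by_cases h2 : start = end_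
      · rw [goA, if_neg h1, if_pos h2, valR, if_neg h1, if_pos h2]
        show PySem.List.pyGetD (PySem.List.pySetD tree node num) node 0 = num
        apply getD_setD_self
        have hL : node.toNat < tree.length := by
          have hS1 : (end_ - start + 1).toNat = 1 := by omega
          rw [hS1, Nat.clog_one_right] at hb
          simp at hb
          omega
        exact ⟨by omega, by omega⟩
      · have hse : start < end_ := by omega
        have hbs := bound_step node start end_ tree.length hn hse hb
        have hml := pvMeasLeft hse
        have hmr := pvMeasRight hse
        have hmb := PySem.Int.floordiv_two_mid_bounds (lo := start) (hi := end_) (by omega)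
        have hmlt : PySem.Int.floordiv (start + end_) 2 < end_ :=
          (PySem.Int.floordiv_lt_iff_lt_mul (by omega)).mpr (by omega)
        obtain ⟨fuel', rfl⟩ : ∃ f', fuel = f' + 1 := ⟨fuel - 1, by omega⟩
        rw [goA, if_neg h1, if_neg h2]
        set m := PySem.Int.floordiv (start + end_) 2 with hmdef
        set l := goA (fuel' + 1) tree index num (2 * node) start m with hldef
        set r := goA (fuel' + 1) l.1 index num (2 * node + 1) (m + 1) end_ with hrdef
        have hlenl : l.1.length = tree.length := goA_length _ _ _ _ _ _ _
        show PySem.List.pyGetD (PySem.List.pySetD r.1 node (min l.2 r.2)) node 0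
            = valR tree index num node start end_
        by_cases hcase : index ≤ m
        · -- descend left; the right child call is a plain read of the untouched sibling
          have hl2 : l.2 = valR tree index num (2 * node) start m := ih _ _ _ _ (by omega) (by omega) hbs.1
          have hr' : r = (l.1, PySem.List.pyGetD l.1 (2 * node + 1) 0) := by
            rw [hrdef, goA, if_pos (Or.inl (by omega))]
          have hsib : PySem.List.pyGetD l.1 (2 * node + 1) 0 = PySem.List.pyGetD tree (2 * node + 1) 0 := by
            apply pyGetD_congr _ _ _ (by omega) hlenl
            apply goA_get?_eq _ _ _ _ _ _ _ (by omega)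
            intro k
            have h2n : ((2 * node + 1 : Int)).toNat = 2 * node.toNat + 1 := by omega
            have h2n' : ((2 * node : Int)).toNat = 2 * node.toNat := by omega
            rw [h2n, h2n']
            exact not_desc_right node.toNat (by omega) k
          have hlenr : r.1.length = tree.length := by rw [hr']; exact hlenl
          have hnlt := node_lt node tree.length _ hb
          have hrange : PySem.Raise.InRange r.1.length node := ⟨by omega, by omega⟩
          rw [getD_setD_self _ _ _ hrange, hr']
          rw [valR, if_neg h1, if_neg h2, ← hmdef, if_pos hcase]
          rw [hl2, hsib]
        · -- descend right; the left child call is a plain read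
          have hl' : l = (tree, PySem.List.pyGetD tree (2 * node) 0) := by
            rw [hldef, goA, if_pos (Or.inr (by omega))]
          have hr2 : r.2 = valR l.1 index num (2 * node + 1) (m + 1) end_ := by
            apply ih _ _ _ _ (by omega) (by omega)
            rw [hlenl]
            exact hbs.2
          have hlenr : r.1.length = tree.length := by
            rw [(goA_length (fuel' + 1) l.1 index num (2 * node + 1) (m + 1) end_ : r.1.length = l.1.length), hlenl]
          have hnlt := node_lt node tree.length _ hb
          have hrange : PySem.Raise.InRange r.1.length node := ⟨by omega, by omega⟩
          rw [getD_setD_self _ _ _ hrange]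
          rw [valR, if_neg h1, if_neg h2, ← hmdef, if_neg hcase]
          rw [hr2, hl']

-- the value component of B's upward update loop ignores the written tree
theorem foldl_snd (l : List (Int × Int)) (t : List Int) (v : Int) :
    (l.foldl (fun (st : List Int × Int) p => (PySem.List.pySetD st.1 p.1 (min st.2 p.2), min st.2 p.2)) (t, v)).2
      = l.foldl (fun w p => min w p.2) v := by
  induction l generalizing t v with
  | nil => rfl
  | cons p l ih => simpa using ih _ _

theorem descendB_val (fuel : Nat) (tree : List Int) (index num node start end_ : Int)
    (hf : (end_ - start).toNat < fuel) (hs : start ≤ index) (he : index ≤ end_) :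
    (descendB fuel tree index node start end_).1.reverse.foldl (fun w p => min w p.2) num
      = valR tree index num node start end_ := by
  revert hf hs he
  induction fuel generalizing tree node start end_ with
  | zero => intro hf _ _; omega
  | succ fuel ih =>
    intro hf hs he
    by_cases hlt : start < end_
    · have hml := pvMeasLeft hlt
      have hmr := pvMeasRight hlt
      have hmb := PySem.Int.floordiv_two_mid_bounds (lo := start) (hi := end_) (by omega)
      have hmlt : PySem.Int.floordiv (start + end_) 2 < end_ :=
        (PySem.Int.floordiv_lt_iff_lt_mul (by omega)).mpr (by omega)
      rw [descendB, if_pos hlt]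
      set m := PySem.Int.floordiv (start + end_) 2 with hmdef
      by_cases hcase : index ≤ m
      · rw [if_pos hcase]
        set rest := descendB fuel tree index (2 * node) start m with hrest
        show (((node, PySem.List.pyGetD tree (2 * node + 1) 0) :: rest.1).reverse.foldl (fun w p => min w p.2) num) = _
        rw [List.reverse_cons, List.foldl_append, List.foldl_cons, List.foldl_nil]
        rw [valR, if_neg (by omega : ¬(index < start ∨ index > end_)), if_neg (by omega : ¬start = end_),
          ← hmdef, if_pos hcase, ih _ _ _ _ (by omega) hs (by omega)]
      · rw [if_neg hcase]
        set rest := descendB fuel tree index (2 * node + 1) (m + 1) end_ with hrest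
        show (((node, PySem.List.pyGetD tree (2 * node) 0) :: rest.1).reverse.foldl (fun w p => min w p.2) num) = _
        rw [List.reverse_cons, List.foldl_append, List.foldl_cons, List.foldl_nil]
        rw [valR, if_neg (by omega : ¬(index < start ∨ index > end_)), if_neg (by omega : ¬start = end_),
          ← hmdef, if_neg hcase, ih _ _ _ _ (by omega) (by omega) he]
        exact min_comm _ _
    · rw [descendB, if_neg hlt]
      rw [valR, if_neg (by omega : ¬(index < start ∨ index > end_)), if_pos (by omega : start = end_)]
      rfl

theorem update_min_node_spec_core (tree : List Int) (arr : List Int) (index num node start end_ : Int)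
    (hp1 : start ≤ index ∧ index ≤ end_ ∧ start < end_ →
      1 ≤ node ∧ (node.toNat + 1) * 2 ^ Nat.clog 2 ((end_ - start + 1).toNat) ≤ tree.length)
    (hp2 : ¬(start ≤ index ∧ index ≤ end_ ∧ start < end_) → PySem.Raise.InRange tree.length node) :
    (goA ((end_ - start).toNat + 1) tree index num node start end_).2
      = update_min_node_alt tree arr index num node start end_ := by
  by_cases h1 : index < start ∨ index > end_
  · have hA : goA ((end_ - start).toNat + 1) tree index num node start end_
        = (tree, PySem.List.pyGetD tree node 0) := by
      rw [goA, if_pos h1]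
    rw [hA, update_min_node_alt, if_pos h1]
  · by_cases h2 : start = end_
    · have hr := hp2 (by omega)
      have hA : goA ((end_ - start).toNat + 1) tree index num node start end_
          = (PySem.List.pySetD tree node num, PySem.List.pyGetD (PySem.List.pySetD tree node num) node 0) := by
        rw [goA, if_neg h1, if_pos h2]
      have hd : descendB ((end_ - start).toNat + 1) tree index node start end_ = ([], node) := by
        rw [descendB, if_neg (by omega : ¬ start < end_)]
      rw [hA, update_min_node_alt, if_neg h1, hd]
      show PySem.List.pyGetD (PySem.List.pySetD tree node num) node 0 = num
      exact getD_setD_self _ _ _ hr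
    · obtain ⟨hn, hb⟩ := hp1 (by omega)
      rw [goA_val _ _ _ _ _ _ _ (by omega) hn hb, update_min_node_alt, if_neg h1]
      show valR tree index num node start end_
        = ((descendB ((end_ - start).toNat + 1) tree index node start end_).1.reverse.foldl
            (fun (st : List Int × Int) p => (PySem.List.pySetD st.1 p.1 (min st.2 p.2), min st.2 p.2))
            (PySem.List.pySetD tree (descendB ((end_ - start).toNat + 1) tree index node start end_).2 num, num)).2
      rw [foldl_snd, descendB_val _ tree index num node start end_ (by omega) (by omega) (by omega)]

-- ===== VERDICT (by name: the statement is the Claim_ definition above) =====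
theorem update_min_node_spec : Claim_equal_update_min_node := by
  intro tree arr index num node start end_ _hdom hpre
  exact update_min_node_spec_core tree arr index num node start end_ hpre.1 hpre.2
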